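-- pv_equiv track=rewrite | github.com/jo15122002/flair | src/diff.py | filter_diff
-- ===== SOURCE A (Python) =====
-- def filter_diff(diff, patterns):
--     out, skip = [], False
--     for l in diff.splitlines():
--         if l.startswith("diff --git"):
--             file = l.split()[2][2:]
--             skip = any(p in file.lower() for p in patterns)
--         if not skip:
--             out.append(l)
--     return "\n".join(out)
-- ===== SOURCE B (Python) =====
-- def filter_diff(diff, patterns):
--     # group lines into segments at "diff --git" headers, then keep whole segments
--     segs = [[]]
--     for l in diff.splitlines():
--         if l.startswith("diff --git"):
--             segs.append([])
--         segs[-1].append(l)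
--     kept = segs[0][:]
--     for s in segs[1:]:
--         f = s[0].split()[2][2:].lower()
--         if not any(p in f for p in patterns):
--             kept += s
--     return "\n".join(kept)
-- ===== Notes on version B (the rewrite author's own statement) =====
-- stated objective: alternative
-- what changed: Replaces the carried skip-flag single pass with a group-then-filter structure: lines are first grouped into header-started segments (plus an always-kept preamble), then whole segments are kept or dropped by one per-segment pattern check.
import Mathlib
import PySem

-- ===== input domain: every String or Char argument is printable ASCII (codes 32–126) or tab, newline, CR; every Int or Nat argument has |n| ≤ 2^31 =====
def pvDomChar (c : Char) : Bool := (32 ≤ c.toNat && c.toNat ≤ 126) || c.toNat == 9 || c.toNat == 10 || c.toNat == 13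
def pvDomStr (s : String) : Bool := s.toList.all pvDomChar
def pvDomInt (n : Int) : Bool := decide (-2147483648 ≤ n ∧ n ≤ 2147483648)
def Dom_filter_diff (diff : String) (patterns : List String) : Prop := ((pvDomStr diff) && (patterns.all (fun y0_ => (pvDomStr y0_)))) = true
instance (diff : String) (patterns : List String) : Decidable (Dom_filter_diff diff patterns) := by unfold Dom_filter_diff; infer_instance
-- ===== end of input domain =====

-- B replaces A's carried skip-flag single pass by a group-then-filter decomposition
-- (segments started at "diff --git" headers, kept whole): an alternative of the same cost.


-- ===== PORT A =====
-- loop body of A's single pass; Pre_ excludes the inputs where pyGet? is none (Python IndexError)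
def pvStepA (patterns : List String) (st : List String × Bool) (l : String) : List String × Bool :=
  let skip :=
    if PySem.Str.startswith l "diff --git" then
      let file := PySem.Str.slice ((PySem.List.pyGet? (PySem.Str.split₀ l) 2).getD "") (some 2) none
      patterns.any (fun p => PySem.Str.isIn p (PySem.Str.lower file))
    else st.2
  if !skip then (st.1 ++ [l], skip) else (st.1, skip)

def filter_diff (diff : String) (patterns : List String) : String :=
  PySem.Str.join "\n" ((PySem.Str.splitlines diff).foldl (pvStepA patterns) ([], false)).1

-- ===== PORT B =====
-- keep = not any(p in s[0].split()[2][2:].lower() for p in patterns); Pre_ excludes pyGet? = none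
def pvSegKeep (patterns : List String) (s : List String) : Bool :=
  let f := PySem.Str.lower (PySem.Str.slice ((PySem.List.pyGet? (PySem.Str.split₀ (s.headD "")) 2).getD "") (some 2) none)
  !(patterns.any (fun p => PySem.Str.isIn p f))

-- segs[-1].append(l)
def pvLastAppend (segs : List (List String)) (l : String) : List (List String) :=
  segs.dropLast ++ [segs.getLastD [] ++ [l]]

-- grouping loop body of B
def pvStepB (segs : List (List String)) (l : String) : List (List String) :=
  pvLastAppend (if PySem.Str.startswith l "diff --git" then segs ++ [[]] else segs) l

def pvKept (patterns : List String) (segs : List (List String)) : List String :=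
  segs.tail.foldl (fun kept s => if pvSegKeep patterns s then kept ++ s else kept) (segs.headD [])

def filter_diff_alt (diff : String) (patterns : List String) : String :=
  PySem.Str.join "\n" (pvKept patterns ((PySem.Str.splitlines diff).foldl pvStepB [[]]))

-- ===== PRECONDITION & SPEC =====
-- Pre_ excludes exactly the inputs on which Python A raises IndexError:
-- a line starting with "diff --git" whose whitespace split has fewer than 3 tokens.
def Pre_filter_diff (diff : String) (patterns : List String) : Prop :=
  ∀ l ∈ PySem.Str.splitlines diff,
    PySem.Str.startswith l "diff --git" = true → 3 ≤ (PySem.Str.split₀ l).length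

instance (diff : String) (patterns : List String) : Decidable (Pre_filter_diff diff patterns) := by
  unfold Pre_filter_diff; infer_instance

def pvWitness_filter_diff : String × List String :=
  ("diff --git a/foo.py b/foo.py\n+hello\ndiff --git a/t.lock b/t.lock\n-bye", ["lock"])

def Spec_filter_diff (diff : String) (patterns : List String) (out : String) : Prop :=
  out = filter_diff_alt diff patterns

instance (diff : String) (patterns : List String) (out : String) : Decidable (Spec_filter_diff diff patterns out) := by
  unfold Spec_filter_diff; infer_instance

-- ===== CLAIM =====
def Claim_equal_filter_diff : Prop :=
  ∀ (diff : String) (patterns : List String), Dom_filter_diff diff patterns →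
    Pre_filter_diff diff patterns → Spec_filter_diff diff patterns (filter_diff diff patterns)

-- ===== LEMMAS AND PROOFS =====
-- A's emitted lines as a recursion on the line list
def pvDelta (patterns : List String) (lines : List String) (skip : Bool) : List String :=
  match lines with
  | [] => []
  | l :: ls =>
    let skip' := if PySem.Str.startswith l "diff --git" then !pvSegKeep patterns [l] else skip
    (if skip' then [] else [l]) ++ pvDelta patterns ls skip'

theorem pvStepA_skip (patterns : List String) (st : List String × Bool) (l : String)
    (h : PySem.Str.startswith l "diff --git" = true) :
    pvStepA patterns st l =
      (if pvSegKeep patterns [l] then st.1 ++ [l] else st.1, !pvSegKeep patterns [l]) := by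
  unfold pvStepA pvSegKeep
  simp only [h, if_true, List.headD_cons]
  by_cases hb : (patterns.any fun p => PySem.Str.isIn p
      (PySem.Str.lower (PySem.Str.slice ((PySem.List.pyGet? (PySem.Str.split₀ l) 2).getD "") (some 2) none))) = true
  · simp only [hb]; rfl
  · rw [Bool.not_eq_true] at hb; simp only [hb]; rfl

theorem pvStepA_noskip (patterns : List String) (st : List String × Bool) (l : String)
    (h : PySem.Str.startswith l "diff --git" = false) :
    pvStepA patterns st l = (if st.2 then st.1 else st.1 ++ [l], st.2) := by
  unfold pvStepA
  simp only [h, Bool.false_eq_true, if_false]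
  cases hb : st.2 <;> simp

theorem pvDelta_cons_header (patterns : List String) (l : String) (ls : List String) (skip : Bool)
    (h : PySem.Str.startswith l "diff --git" = true) :
    pvDelta patterns (l :: ls) skip =
      (if pvSegKeep patterns [l] then [l] else []) ++ pvDelta patterns ls (!pvSegKeep patterns [l]) := by
  conv_lhs => rw [pvDelta]
  simp only [h, if_true]
  cases hk : pvSegKeep patterns [l] <;> simp

theorem pvDelta_cons_plain (patterns : List String) (l : String) (ls : List String) (skip : Bool)
    (h : PySem.Str.startswith l "diff --git" = false) :
    pvDelta patterns (l :: ls) skip = (if skip then [] else [l]) ++ pvDelta patterns ls skip := by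
  conv_lhs => rw [pvDelta]
  simp only [h, Bool.false_eq_true, if_false]

theorem pvFoldA_delta (patterns : List String) (lines : List String) :
    ∀ (out : List String) (skip : Bool),
      (lines.foldl (pvStepA patterns) (out, skip)).1 = out ++ pvDelta patterns lines skip := by
  induction lines with
  | nil => intro out skip; simp [pvDelta]
  | cons l ls ih =>
    intro out skip
    rw [List.foldl_cons]
    by_cases h : PySem.Str.startswith l "diff --git" = true
    · rw [pvStepA_skip patterns (out, skip) l h, pvDelta_cons_header patterns l ls skip h, ih]
      cases hk : pvSegKeep patterns [l] <;> simp
    · rw [Bool.not_eq_true] at h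
      rw [pvStepA_noskip patterns (out, skip) l h, pvDelta_cons_plain patterns l ls skip h, ih]
      cases hs : skip <;> simp

theorem pvLastAppend_concat (init : List (List String)) (cur : List String) (l : String) :
    pvLastAppend (init ++ [cur]) l = init ++ [cur ++ [l]] := by
  simp [pvLastAppend]

theorem pvStepB_header (segs : List (List String)) (l : String)
    (h : PySem.Str.startswith l "diff --git" = true) :
    pvStepB segs l = segs ++ [[l]] := by
  unfold pvStepB
  simp only [h, if_true]
  simpa using pvLastAppend_concat segs [] l

theorem pvStepB_plain (init : List (List String)) (cur : List String) (l : String)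
    (h : PySem.Str.startswith l "diff --git" = false) :
    pvStepB (init ++ [cur]) l = init ++ [cur ++ [l]] := by
  unfold pvStepB
  simp only [h, Bool.false_eq_true, if_false]
  exact pvLastAppend_concat init cur l

theorem pvSegKeep_append (patterns : List String) (cur : List String) (l : String)
    (h : cur ≠ []) : pvSegKeep patterns (cur ++ [l]) = pvSegKeep patterns cur := by
  cases cur with
  | nil => exact absurd rfl h
  | cons a t => simp [pvSegKeep]

-- render of B's state: preamble plus the kept tail segments, flattened
def pvRender (patterns : List String) (segs : List (List String)) : List String :=
  segs.headD [] ++ ((segs.tail.filter (pvSegKeep patterns)).flatten)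

theorem pvKey (patterns : List String) (lines : List String) :
    ∀ (first : List String) (done : List (List String)) (cur : List String), cur ≠ [] →
      pvRender patterns (lines.foldl pvStepB (first :: done ++ [cur]))
        = first ++ ((done.filter (pvSegKeep patterns)).flatten)
            ++ (if pvSegKeep patterns cur then cur else [])
            ++ pvDelta patterns lines (!pvSegKeep patterns cur) := by
  induction lines with
  | nil =>
    intro first done cur hcur
    rw [List.foldl_nil]
    cases hk : pvSegKeep patterns cur <;>
      simp [pvRender, pvDelta, List.filter_append, List.filter, hk]
  | cons l ls ih =>
    intro first done cur hcur
    rw [List.foldl_cons]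
    by_cases h : PySem.Str.startswith l "diff --git" = true
    · have hstep : pvStepB (first :: done ++ [cur]) l = first :: (done ++ [cur]) ++ [[l]] := by
        simpa using pvStepB_header (first :: done ++ [cur]) l h
      rw [hstep, ih first (done ++ [cur]) [l] (by simp),
        pvDelta_cons_header patterns l ls (!pvSegKeep patterns cur) h,
        List.filter_append, List.flatten_append]
      cases hk : pvSegKeep patterns cur <;> cases hl : pvSegKeep patterns [l] <;>
        simp [List.filter, hk]
    · rw [Bool.not_eq_true] at h
      have hstep : pvStepB (first :: done ++ [cur]) l = first :: done ++ [cur ++ [l]] := by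
        simpa using pvStepB_plain (first :: done) cur l h
      rw [hstep, ih first done (cur ++ [l]) (by simp),
        pvSegKeep_append patterns cur l hcur,
        pvDelta_cons_plain patterns l ls (!pvSegKeep patterns cur) h]
      cases hk : pvSegKeep patterns cur <;> simp

theorem pvPre (patterns : List String) (lines : List String) :
    ∀ (pre : List String),
      pvRender patterns (lines.foldl pvStepB [pre]) = pre ++ pvDelta patterns lines false := by
  induction lines with
  | nil => intro pre; simp [pvRender, pvDelta]
  | cons l ls ih =>
    intro pre
    rw [List.foldl_cons]
    by_cases h : PySem.Str.startswith l "diff --git" = true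
    · have hstep : pvStepB [pre] l = pre :: ([] : List (List String)) ++ [[l]] := by
        simpa using pvStepB_header [pre] l h
      rw [hstep, pvKey patterns ls pre [] [l] (by simp),
        pvDelta_cons_header patterns l ls false h]
      cases hl : pvSegKeep patterns [l] <;> simp
    · rw [Bool.not_eq_true] at h
      have hstep : pvStepB [pre] l = [pre ++ [l]] := by
        simpa using pvStepB_plain [] pre l h
      rw [hstep, ih (pre ++ [l]), pvDelta_cons_plain patterns l ls false h]
      simp

theorem pvKept_render (patterns : List String) (segs : List (List String)) :
    pvKept patterns segs = pvRender patterns segs := by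
  unfold pvKept pvRender
  rw [PySem.List.foldl_if_eq_foldl_filter, PySem.List.foldl_append_eq_flatten]

-- ===== VERDICT =====
theorem filter_diff_spec : Claim_equal_filter_diff := by
  intro diff patterns _ _
  unfold Spec_filter_diff filter_diff filter_diff_alt
  rw [pvKept_render, pvPre patterns (PySem.Str.splitlines diff) [],
    pvFoldA_delta patterns (PySem.Str.splitlines diff) [] false]
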